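-- pv_equiv track=rewrite | github.com/anothel/CodeKata | 백준/Bronze/2966. 찍기/찍기.py | make_Adrian
-- ===== SOURCE A (Python) =====
-- def make_Adrian(n: int) -> str:
--     myAnswer: str = ''
--     answerTable: list = ['A', 'B', 'C']
--     i: int = 0
--     for _ in range(n):
--         myAnswer += answerTable[i]
--         i += 1
--         if i == len(answerTable):
--             i = 0
--     return myAnswer
-- ===== SOURCE B (Python) =====
-- def make_Adrian(n: int) -> str:
--     # Closed form: repeat the base pattern enough times, then cut to length n.
--     return ('ABC' * (n // 3 + 1))[:n]
-- ===== Notes on version B (the rewrite author's own statement) =====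
-- stated objective: faster
-- what changed: Replaces the per-character append loop with a cycling index by a closed-form bulk string repetition 'ABC' * (n//3+1) sliced to the first n characters.
import Mathlib
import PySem

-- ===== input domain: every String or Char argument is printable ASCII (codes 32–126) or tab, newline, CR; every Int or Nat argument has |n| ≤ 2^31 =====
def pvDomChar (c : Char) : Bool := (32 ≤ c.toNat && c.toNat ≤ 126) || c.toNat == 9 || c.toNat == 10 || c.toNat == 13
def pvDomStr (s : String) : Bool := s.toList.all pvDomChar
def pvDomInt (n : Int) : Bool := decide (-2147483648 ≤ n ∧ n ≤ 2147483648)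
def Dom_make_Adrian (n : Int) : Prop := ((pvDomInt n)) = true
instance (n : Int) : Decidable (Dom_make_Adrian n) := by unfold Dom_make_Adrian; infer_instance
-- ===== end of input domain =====

-- B replaces A's per-character append loop (cycling index) by a closed-form
-- repetition of "ABC" sliced to the first n characters (idiomatic one-liner).


-- ===== PORT A =====
-- one loop iteration of A: append answerTable[i], bump i, wrap at len(answerTable)
def adrianStep (st : List Char × Int) (_j : Int) : List Char × Int :=
  let table : List Char := ['A', 'B', 'C']
  let c := PySem.List.pyGetD table st.2 ' '   -- answerTable[i]; i is always 0..2, so in range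
  let i := st.2 + 1
  (st.1 ++ [c], if i = (table.length : Int) then 0 else i)

def make_Adrian (n : Int) : String :=
  let r := (PySem.List.pyRange 0 n 1).foldl adrianStep ([], 0)
  String.ofList r.1

-- ===== PORT B =====
def make_Adrian_alt (n : Int) : String :=
  let reps := PySem.Int.floordiv n 3 + 1                         -- n // 3 + 1
  let big := (List.replicate reps.toNat "ABC".toList).flatten    -- 'ABC' * reps
  String.ofList (PySem.List.slice big none (some n))                 -- [:n]

-- ===== PRECONDITION & SPEC =====
def Spec_make_Adrian (n : Int) (out : String) : Prop := out = make_Adrian_alt n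
instance (n : Int) (out : String) : Decidable (Spec_make_Adrian n out) := by unfold Spec_make_Adrian; infer_instance

-- ===== CLAIM (what is proved, stated in full; the proofs are below) =====
def Claim_equal_make_Adrian : Prop := ∀ (n : Int), Dom_make_Adrian n → Spec_make_Adrian n (make_Adrian n)

-- ===== LEMMAS AND PROOFS =====

-- the infinite repeating pattern, by absolute position
def cyc (k : Nat) : Char := if k % 3 = 0 then 'A' else if k % 3 = 1 then 'B' else 'C'

lemma loopA (m : Nat) :
    (PySem.List.pyRange 0 (m : Int) 1).foldl adrianStep ([], 0)
      = ((List.range m).map cyc, ((m % 3 : Nat) : Int)) := by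
  induction m with
  | zero => simp [PySem.List.pyRange_one_eq_nil]
  | succ m ih =>
    have h : ((m + 1 : Nat) : Int) = (m : Int) + 1 := by push_cast; ring
    rw [h, PySem.List.pyRange_one_succ_right (by positivity), List.foldl_append, ih]
    simp only [List.foldl_cons, List.foldl_nil]
    have h3 : m % 3 < 3 := Nat.mod_lt m (by omega)
    unfold adrianStep cyc
    have h3' : m % 3 = 0 ∨ m % 3 = 1 ∨ m % 3 = 2 := by omega
    rcases h3' with h0 | h0 | h0 <;>
      simp [h0, List.range_succ, PySem.List.pyGetD, Nat.add_mod]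

lemma flatten_replicate (r : Nat) :
    (List.replicate r ("ABC".toList)).flatten = (List.range (3 * r)).map cyc := by
  induction r with
  | zero => simp
  | succ r ih =>
    rw [List.replicate_succ', List.flatten_append, ih]
    have h1 : 3 * (r + 1) = (3 * r) + 1 + 1 + 1 := by ring
    rw [h1, List.range_succ, List.range_succ, List.range_succ]
    simp only [List.map_append, List.map_cons, List.map_nil]
    have c0 : cyc (3 * r) = 'A' := by unfold cyc; simp [Nat.mul_mod_right]
    have c1 : cyc (3 * r + 1) = 'B' := by
      unfold cyc; have : (3 * r + 1) % 3 = 1 := by omega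
      simp [this]
    have c2 : cyc (3 * r + 1 + 1) = 'C' := by
      unfold cyc; have : (3 * r + 1 + 1) % 3 = 2 := by omega
      simp [this]
    simp [c0, c1, c2]

-- ===== VERDICT (by name: the statement is the Claim_ definition above) =====
theorem make_Adrian_spec : Claim_equal_make_Adrian := by
  intro n _
  unfold Spec_make_Adrian make_Adrian make_Adrian_alt
  by_cases hn : n ≤ 0
  · -- A's loop runs zero times; B's repetition count is ≤ 0 (or slice to ≤ 0 chars)
    rw [PySem.List.pyRange_one_eq_nil hn]
    simp only [List.foldl_nil]
    rcases lt_or_eq_of_le hn with hlt | heq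
    · -- n < 0 : reps ≤ 0 so big = [], any slice of [] is []
      have hd : PySem.Int.floordiv n 3 + 1 ≤ 0 := by
        have := PySem.Int.floordiv_mul_add_mod n 3
        have hm := PySem.Int.mod_lt (a := n) (b := 3) (by omega)
        have hm0 := PySem.Int.mod_nonneg (a := n) (b := 3) (by omega)
        omega
      have hb : (PySem.Int.floordiv n 3 + 1).toNat = 0 := by omega
      rw [hb]
      simp [PySem.List.slice]
    · subst heq
      decide
  · -- n > 0
    obtain ⟨m, rfl⟩ : ∃ m : Nat, n = (m : Int) := ⟨n.toNat, by omega⟩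
    rw [loopA]
    have key : PySem.List.slice
        ((List.replicate (PySem.Int.floordiv (m : Int) 3 + 1).toNat "ABC".toList).flatten)
        none (some (m : Int)) = (List.range m).map cyc := by
      have hrep : (PySem.Int.floordiv (m : Int) 3 + 1).toNat = m / 3 + 1 := by
        rw [PySem.Int.floordiv_eq_ediv_of_pos (by omega : (0:Int) < 3)]; omega
      rw [hrep, flatten_replicate, PySem.List.slice_to _ (by positivity),
        Int.toNat_natCast, ← List.map_take, List.take_range]
      congr 2
      omega
    simp only [key]
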